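-- pv_equiv track=rewrite | github.com/wioota/devloop | src/devloop/agents/git_commit_assistant.py | _determine_primary_type
-- ===== SOURCE A (Python) =====
-- from typing import Dict, Any, List, Optional
--
-- def _determine_primary_type(analysis: Dict[str, Any]) -> str:
--     """Determine the primary commit type."""
--     change_types = analysis.get("change_types", [])
--
--     # Priority order for commit types
--     type_priority = {
--         "fix": ["fix", "bug", "patch"],
--         "feat": ["feat", "feature", "add"],
--         "docs": ["docs", "documentation"],
--         "test": ["test", "spec"],
--         "ci": ["ci", "config", "build"],
--         "refactor": ["refactor", "clean", "improve"],
--         "style": ["style", "format"],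
--         "perf": ["perf", "performance", "optimize"],
--         "chore": ["chore", "maintenance"],
--     }
--
--     for commit_type, keywords in type_priority.items():
--         for change_type in change_types:
--             if any(keyword in change_type.lower() for keyword in keywords):
--                 return commit_type
--
--     # Default to refactor if nothing specific
--     return "refactor"
-- ===== SOURCE B (Python) =====
-- # B: two passes — collect the set of matched commit types, then resolve by priority order.
-- TYPE_KEYWORDS = {
--     "fix": ["fix", "bug", "patch"],
--     "feat": ["feat", "feature", "add"],
--     "docs": ["docs", "documentation"],
--     "test": ["test", "spec"],
--     "ci": ["ci", "config", "build"],
--     "refactor": ["refactor", "clean", "improve"],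
--     "style": ["style", "format"],
--     "perf": ["perf", "performance", "optimize"],
--     "chore": ["chore", "maintenance"],
-- }
--
--
-- def _determine_primary_type(analysis):
--     change_types = analysis.get("change_types", [])
--     matched = set()
--     for change_type in change_types:
--         lowered = change_type.lower()
--         for commit_type, keywords in TYPE_KEYWORDS.items():
--             if any(k in lowered for k in keywords):
--                 matched.add(commit_type)
--     for commit_type in TYPE_KEYWORDS:
--         if commit_type in matched:
--             return commit_type
--     return "refactor"
-- ===== Notes on version B (the rewrite author's own statement) =====
-- stated objective: alternative
-- what changed: Replaced the short-circuiting priority-first nested loop with two distinct passes: one pass over change_types collects the set of matched commit types, a second pass over the priority order picks the first matched one.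
import Mathlib
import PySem

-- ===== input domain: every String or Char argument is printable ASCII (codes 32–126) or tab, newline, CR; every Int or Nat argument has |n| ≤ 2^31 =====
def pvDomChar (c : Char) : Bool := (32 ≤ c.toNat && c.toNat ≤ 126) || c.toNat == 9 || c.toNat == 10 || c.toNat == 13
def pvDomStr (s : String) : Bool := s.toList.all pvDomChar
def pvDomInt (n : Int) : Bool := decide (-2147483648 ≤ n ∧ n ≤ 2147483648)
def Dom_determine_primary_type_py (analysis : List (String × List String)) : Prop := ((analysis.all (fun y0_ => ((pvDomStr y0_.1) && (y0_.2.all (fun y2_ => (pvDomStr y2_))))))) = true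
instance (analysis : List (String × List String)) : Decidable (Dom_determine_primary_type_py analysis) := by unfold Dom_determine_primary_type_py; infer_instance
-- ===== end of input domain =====

-- B is an alternative decomposition (collect matched types, then resolve by priority order), same cost; return values proved equal.

-- the literal keyword table both Python sources carry
def pvTypePriority : List (String × List String) := [
  ("fix", ["fix", "bug", "patch"]),
  ("feat", ["feat", "feature", "add"]),
  ("docs", ["docs", "documentation"]),
  ("test", ["test", "spec"]),
  ("ci", ["ci", "config", "build"]),
  ("refactor", ["refactor", "clean", "improve"]),
  ("style", ["style", "format"]),
  ("perf", ["perf", "performance", "optimize"]),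
  ("chore", ["chore", "maintenance"])]

-- ===== PORT A =====
-- A's nested loop: for (commit_type, keywords) in priority order, return commit_type
-- as soon as some change_type's lowercase form contains one of the keywords.
def pvLoopA : List (String × List String) → List String → String
  | [], _ => "refactor"
  | (ct, kws) :: rest, cs =>
    if cs.any (fun c => kws.any (fun kw => PySem.Str.isIn kw (PySem.Str.lower c))) then ct
    else pvLoopA rest cs

def determine_primary_type_py (analysis : List (String × List String)) : String :=
  pvLoopA pvTypePriority ((PySem.Dict.mk analysis).getD "change_types" [])

-- ===== PORT B =====
-- first pass: add to the set every commit type one change_type matches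
def pvMark (s : PySem.Set String) (c : String) : PySem.Set String :=
  let lowered := PySem.Str.lower c
  pvTypePriority.foldl
    (fun s p => if p.2.any (fun k => PySem.Str.isIn k lowered) then PySem.Set.add s p.1 else s) s

def determine_primary_type_py_alt (analysis : List (String × List String)) : String :=
  let change_types := (PySem.Dict.mk analysis).getD "change_types" []
  let matched := change_types.foldl pvMark PySem.Set.empty
  -- second pass: first commit type in priority order that is in the matched set
  match pvTypePriority.find? (fun p => PySem.Set.contains matched p.1) with
  | some p => p.1
  | none => "refactor"

-- ===== PRECONDITION & SPEC =====
def Spec_determine_primary_type_py (analysis : List (String × List String)) (out : String) : Prop := out = determine_primary_type_py_alt analysis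
instance (analysis : List (String × List String)) (out : String) : Decidable (Spec_determine_primary_type_py analysis out) := by unfold Spec_determine_primary_type_py; infer_instance

-- ===== CLAIM (what is proved, stated in full; the proofs are below) =====
def Claim_equal_determine_primary_type_py : Prop := ∀ (analysis : List (String × List String)), Dom_determine_primary_type_py analysis → Spec_determine_primary_type_py analysis (determine_primary_type_py analysis)

-- ===== LEMMAS AND PROOFS =====

-- the shared match predicate: some keyword of p occurs in change_type c lowered
def pvP (p : String × List String) (c : String) : Bool :=
  p.2.any (fun kw => PySem.Str.isIn kw (PySem.Str.lower c))

lemma mem_markFold (l : List (String × List String)) (s : PySem.Set String) (c : String)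
    (x : String) :
    x ∈ l.foldl (fun s p => if pvP p c then PySem.Set.add s p.1 else s) s ↔
      x ∈ s ∨ ∃ p ∈ l, p.1 = x ∧ pvP p c = true := by
  induction l generalizing s with
  | nil => simp
  | cons p rest ih =>
    simp only [List.foldl_cons]
    split_ifs with h <;> rw [ih] <;> simp only [PySem.Set.mem_add, List.mem_cons]
    · constructor
      · rintro ((hs | rfl) | ⟨q, hq, h1, h2⟩)
        · exact Or.inl hs
        · exact Or.inr ⟨p, Or.inl rfl, rfl, h⟩
        · exact Or.inr ⟨q, Or.inr hq, h1, h2⟩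
      · rintro (hs | ⟨q, (rfl | hq), h1, h2⟩)
        · exact Or.inl (Or.inl hs)
        · exact Or.inl (Or.inr h1.symm)
        · exact Or.inr ⟨q, hq, h1, h2⟩
    · constructor
      · rintro (hs | ⟨q, hq, h1, h2⟩)
        · exact Or.inl hs
        · exact Or.inr ⟨q, Or.inr hq, h1, h2⟩
      · rintro (hs | ⟨q, (rfl | hq), h1, h2⟩)
        · exact Or.inl hs
        · exact absurd h2 h
        · exact Or.inr ⟨q, hq, h1, h2⟩

lemma mark_eq (s : PySem.Set String) (c : String) :
    pvMark s c = pvTypePriority.foldl (fun s p => if pvP p c then PySem.Set.add s p.1 else s) s := rfl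

lemma mem_matched (cs : List String) (s : PySem.Set String) (x : String) :
    x ∈ cs.foldl pvMark s ↔
      x ∈ s ∨ ∃ c ∈ cs, ∃ p ∈ pvTypePriority, p.1 = x ∧ pvP p c = true := by
  induction cs generalizing s with
  | nil => simp
  | cons c rest ih =>
    rw [List.foldl_cons, ih, mark_eq, mem_markFold]
    simp only [List.mem_cons]
    constructor
    · rintro ((hs | ⟨p, hp, h1, h2⟩) | ⟨c', hc', p, hp, h1, h2⟩)
      · exact Or.inl hs
      · exact Or.inr ⟨c, Or.inl rfl, p, hp, h1, h2⟩
      · exact Or.inr ⟨c', Or.inr hc', p, hp, h1, h2⟩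
    · rintro (hs | ⟨c', (rfl | hc'), p, hp, h1, h2⟩)
      · exact Or.inl (Or.inl hs)
      · exact Or.inl (Or.inr ⟨p, hp, h1, h2⟩)
      · exact Or.inr ⟨c', hc', p, hp, h1, h2⟩

lemma table_key_inj : ∀ p ∈ pvTypePriority, ∀ q ∈ pvTypePriority, p.1 = q.1 → p = q := by decide

lemma contains_matched_eq (cs : List String) (p : String × List String)
    (hp : p ∈ pvTypePriority) :
    PySem.Set.contains (cs.foldl pvMark PySem.Set.empty) p.1 = cs.any (fun c => pvP p c) := by
  rw [Bool.eq_iff_iff]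
  rw [PySem.Set.contains_iff, mem_matched]
  simp only [PySem.Set.empty, List.not_mem_nil, false_or, List.any_eq_true]
  constructor
  · rintro ⟨c, hc, q, hq, hqe, hqP⟩
    rw [table_key_inj q hq p hp hqe] at hqP
    exact ⟨c, hc, hqP⟩
  · rintro ⟨c, hc, hP⟩
    exact ⟨c, hc, p, hp, rfl, hP⟩

lemma find?_congr_mem {α : Type} (l : List α) (f g : α → Bool)
    (h : ∀ a ∈ l, f a = g a) : l.find? f = l.find? g := by
  induction l with
  | nil => rfl
  | cons a rest ih =>
    rw [List.find?_cons, List.find?_cons, h a (List.mem_cons_self ..)]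
    cases g a
    · exact ih (fun b hb => h b (List.mem_cons_of_mem _ hb))
    · rfl

lemma loopA_eq (prio : List (String × List String)) (cs : List String) :
    pvLoopA prio cs =
      (match prio.find? (fun p => cs.any (fun c => pvP p c)) with
       | some p => p.1
       | none => "refactor") := by
  induction prio with
  | nil => rfl
  | cons p rest ih =>
    obtain ⟨ct, kws⟩ := p
    rw [pvLoopA, List.find?_cons]
    simp only [pvP]
    cases h : cs.any (fun c => kws.any fun kw => PySem.Str.isIn kw (PySem.Str.lower c)) <;>
      simp [ih, pvP]

-- ===== VERDICT (by name: the statement is the Claim_ definition above) =====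
theorem determine_primary_type_py_spec : Claim_equal_determine_primary_type_py := by
  intro analysis _
  unfold Spec_determine_primary_type_py determine_primary_type_py determine_primary_type_py_alt
  rw [loopA_eq, find?_congr_mem pvTypePriority _ _
    (fun p hp => (contains_matched_eq _ p hp).symm)]
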